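-- pv_equiv track=rewrite | github.com/1digitaldesign/db-6-weather-documentation | db-16/docs/c4/split_by_categories.py | group_connections_by_use_case
-- ===== SOURCE A (Python) =====
-- from collections import defaultdict
--
-- def group_connections_by_use_case(connections):
--     """Group connections by use case number based on step numbering"""
--     # Connections restart numbering for each use case
--     # Pattern: connections end with "Displays" or "Returns JSON response"
--     use_case_connections = defaultdict(list)
--     current_uc = 1
--     uc_buffer = []
--
--     for from_node, to_node, label in connections:
--         uc_buffer.append((from_node, to_node, label))
--
--         # Check for use case boundary markers
--         if 'Displays' in label or ('Returns JSON response' in label and len(uc_buffer) > 5):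
--             use_case_connections[current_uc] = uc_buffer.copy()
--             uc_buffer = []
--             current_uc += 1
--
--     # Add remaining
--     if uc_buffer:
--         use_case_connections[current_uc] = uc_buffer
--
--     return use_case_connections
-- ===== SOURCE B (Python) =====
-- from collections import defaultdict
--
-- def group_connections_by_use_case(connections):
--     """Group connections by use case number based on step numbering"""
--     out = defaultdict(list)
--     items = [(f, t, l) for f, t, l in connections]
--     n = 1
--     while items:
--         cut = next((i for i, (_, _, lab) in enumerate(items)
--                     if 'Displays' in lab or ('Returns JSON response' in lab and i >= 5)),
--                    None)
--         if cut is None: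
--             out[n] = items
--             break
--         out[n] = items[:cut + 1]
--         items = items[cut + 1:]
--         n += 1
--     return out
-- ===== Notes on version B (the rewrite author's own statement) =====
-- stated objective: alternative
-- what changed: Replaced A's single fold that grows a mutable buffer and a defaultdict with a recursive splitter that repeatedly finds the first boundary index (enumerate + next) and slices off one whole segment per use-case number.
import Mathlib
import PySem

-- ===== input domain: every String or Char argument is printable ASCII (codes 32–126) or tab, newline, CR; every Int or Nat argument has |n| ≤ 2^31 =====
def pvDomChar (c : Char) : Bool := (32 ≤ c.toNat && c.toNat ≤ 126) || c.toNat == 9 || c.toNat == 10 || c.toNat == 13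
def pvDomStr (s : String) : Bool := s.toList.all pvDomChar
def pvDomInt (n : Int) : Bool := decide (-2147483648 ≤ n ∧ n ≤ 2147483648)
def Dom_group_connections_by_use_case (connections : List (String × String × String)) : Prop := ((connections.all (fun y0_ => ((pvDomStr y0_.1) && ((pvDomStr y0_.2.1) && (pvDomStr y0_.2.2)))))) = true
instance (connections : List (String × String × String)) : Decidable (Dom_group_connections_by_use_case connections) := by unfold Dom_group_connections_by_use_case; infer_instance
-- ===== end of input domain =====

-- B replaces A's buffer-accumulating fold with a recursive first-boundary-index splitter (objective: alternative, same cost).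

-- ===== PORT A =====
-- boundary test of A: 'Displays' in label or ('Returns JSON response' in label and len(buf) > 5)
def pvCutA (label : String) (bufLen : Nat) : Bool :=
  PySem.Str.isIn "Displays" label ||
    (PySem.Str.isIn "Returns JSON response" label && decide (bufLen > 5))

def pvStepA (s : PySem.Dict Int (List (String × String × String)) × Int × List (String × String × String))
    (x : String × String × String) :
    PySem.Dict Int (List (String × String × String)) × Int × List (String × String × String) :=
  let buf := s.2.2 ++ [x]
  if pvCutA x.2.2 buf.length then (s.1.insert s.2.1 buf, s.2.1 + 1, [])
  else (s.1, s.2.1, buf)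

def group_connections_by_use_case (connections : List (String × String × String)) : List (Int × List (String × String × String)) :=
  let s := connections.foldl pvStepA (PySem.Dict.empty, 1, [])
  (if !s.2.2.isEmpty then s.1.insert s.2.1 s.2.2 else s.1).items

-- ===== PORT B =====
-- boundary test of B, on the index i within the current segment
def pvCutB (label : String) (i : Nat) : Bool :=
  PySem.Str.isIn "Displays" label ||
    (PySem.Str.isIn "Returns JSON response" label && decide (i ≥ 5))

-- next((i for i, (_,_,lab) in enumerate(items) if ...), None)
def pvFindCut (items : List (String × String × String)) (i : Nat) : Option Nat :=
  match items with
  | [] => none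
  | x :: rest => if pvCutB x.2.2 i then some i else pvFindCut rest (i + 1)

theorem pvFindCut_ne_nil {items : List (String × String × String)} {i c : Nat}
    (h : pvFindCut items i = some c) : items ≠ [] := by
  intro he; subst he; simp [pvFindCut] at h

-- the while loop: slice off one segment per use-case number
def pvGroupB (items : List (String × String × String)) (n : Int) : List (Int × List (String × String × String)) :=
  match h : pvFindCut items 0 with
  | none => if items.isEmpty then [] else [(n, items)]
  | some c => (n, items.take (c + 1)) :: pvGroupB (items.drop (c + 1)) (n + 1)
termination_by items.length
decreasing_by
  have hne := pvFindCut_ne_nil h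
  have : items.length ≠ 0 := by simpa using hne
  rw [List.length_drop]
  omega

def group_connections_by_use_case_alt (connections : List (String × String × String)) : List (Int × List (String × String × String)) :=
  let items := connections.map (fun p => (p.1, p.2.1, p.2.2))
  pvGroupB items 1

-- ===== PRECONDITION & SPEC =====
def Spec_group_connections_by_use_case (connections : List (String × String × String)) (out : List (Int × List (String × String × String))) : Prop := out = group_connections_by_use_case_alt connections
instance (connections : List (String × String × String)) (out : List (Int × List (String × String × String))) : Decidable (Spec_group_connections_by_use_case connections out) := by unfold Spec_group_connections_by_use_case; infer_instance

-- ===== CLAIM (what is proved, stated in full; the proofs are below) =====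
def Claim_equal_group_connections_by_use_case : Prop := ∀ (connections : List (String × String × String)), Dom_group_connections_by_use_case connections → Spec_group_connections_by_use_case connections (group_connections_by_use_case connections)

-- ===== LEMMAS AND PROOFS =====

theorem pvCutA_eq_pvCutB (lab : String) (i : Nat) : pvCutA lab (i + 1) = pvCutB lab i := by
  unfold pvCutA pvCutB
  cases PySem.Str.isIn "Displays" lab <;>
    cases PySem.Str.isIn "Returns JSON response" lab <;>
      simp only [Bool.true_or, Bool.false_or, Bool.true_and, Bool.false_and] <;>
        exact decide_eq_decide.mpr (by omega)

theorem pvGroupB_eq (items : List (String × String × String)) (n : Int) :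
    pvGroupB items n =
      match pvFindCut items 0 with
      | none => if items.isEmpty then [] else [(n, items)]
      | some c => (n, items.take (c + 1)) :: pvGroupB (items.drop (c + 1)) (n + 1) := by
  rw [pvGroupB.eq_def]
  split
  next h => rw [h]
  next c h => rw [h]

theorem pvFindCut_le {items : List (String × String × String)} {i c : Nat}
    (h : pvFindCut items i = some c) : i ≤ c := by
  induction items generalizing i with
  | nil => simp [pvFindCut] at h
  | cons x rest ih =>
    rw [pvFindCut] at h
    split at h
    · simp_all
    · have := ih h; omega

-- A's fold restructured as a recursion on the remaining list with the pending buffer explicit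
def pvGroupAux (buf items : List (String × String × String)) (uc : Int) : List (Int × List (String × String × String)) :=
  match items with
  | [] => if buf.isEmpty then [] else [(uc, buf)]
  | x :: rest =>
    let b := buf ++ [x]
    if pvCutA x.2.2 b.length then (uc, b) :: pvGroupAux [] rest (uc + 1)
    else pvGroupAux b rest uc

theorem pvGroupAux_eq_match (items : List (String × String × String)) :
    ∀ (buf : List (String × String × String)) (uc : Int),
    pvGroupAux buf items uc =
      match pvFindCut items buf.length with
      | none => if (buf ++ items).isEmpty then [] else [(uc, buf ++ items)]
      | some c => (uc, buf ++ items.take (c + 1 - buf.length)) ::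
          pvGroupB (items.drop (c + 1 - buf.length)) (uc + 1)
  | buf, uc => by
    match items with
    | [] => simp [pvGroupAux, pvFindCut]
    | x :: rest =>
      rw [pvGroupAux, pvFindCut]
      simp only [List.length_append, List.length_cons, List.length_nil, Nat.zero_add,
        pvCutA_eq_pvCutB]
      by_cases hc : pvCutB x.2.2 buf.length = true
      · rw [if_pos hc, if_pos hc]
        rw [pvGroupAux_eq_match rest [] (uc + 1)]
        simp only [List.length_nil, List.nil_append, Nat.sub_zero]
        rw [← pvGroupB_eq rest (uc + 1)]
        have ht : buf.length + 1 - buf.length = 1 := by omega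
        rw [ht]
        simp
      · rw [if_neg hc, if_neg hc]
        rw [pvGroupAux_eq_match rest (buf ++ [x]) uc]
        simp only [List.length_append, List.length_cons, List.length_nil, Nat.zero_add]
        cases hfc : pvFindCut rest (buf.length + 1) with
        | none => simp
        | some c =>
          have hle := pvFindCut_le hfc
          have h1 : c + 1 - buf.length = (c + 1 - (buf.length + 1)) + 1 := by omega
          dsimp only
          rw [h1]
          simp [List.append_assoc]
termination_by items.length

theorem pvGroupAux_nil_eq (items : List (String × String × String)) (uc : Int) :
    pvGroupAux [] items uc = pvGroupB items uc := by
  rw [pvGroupAux_eq_match, pvGroupB.eq_def]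
  simp only [List.length_nil, List.nil_append]
  cases pvFindCut items 0 <;> simp

theorem pvFoldA_eq (items : List (String × String × String)) :
    ∀ (d : PySem.Dict Int (List (String × String × String))) (uc : Int)
      (buf : List (String × String × String)),
    (∀ k ∈ d.keys, k < uc) →
    (let s := items.foldl pvStepA (d, uc, buf)
     (if !s.2.2.isEmpty then s.1.insert s.2.1 s.2.2 else s.1).items)
      = d.items ++ pvGroupAux buf items uc := by
  induction items with
  | nil =>
    intro d uc buf hk
    simp only [List.foldl_nil, pvGroupAux]
    by_cases hb : buf.isEmpty
    · simp [hb]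
    · have hnc : d.contains uc = false := by
        by_contra hcon
        have : uc ∈ d.keys := (PySem.Dict.contains_iff_mem_keys d uc).mp
          (by revert hcon; cases d.contains uc <;> simp)
        exact absurd (hk uc this) (by omega)
      simp [hb, PySem.Dict.items_insert_of_not_contains _ _ hnc]
  | cons x rest ih =>
    intro d uc buf hk
    simp only [List.foldl_cons]
    rw [pvGroupAux]
    show (let s := rest.foldl pvStepA (pvStepA (d, uc, buf) x)
          (if !s.2.2.isEmpty then s.1.insert s.2.1 s.2.2 else s.1).items) = _
    rw [pvStepA]
    by_cases hc : pvCutA x.2.2 (buf ++ [x]).length = true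
    · have hnc : d.contains uc = false := by
        by_contra hcon
        have : uc ∈ d.keys := (PySem.Dict.contains_iff_mem_keys d uc).mp
          (by revert hcon; cases d.contains uc <;> simp)
        exact absurd (hk uc this) (by omega)
      rw [if_pos hc, if_pos hc]
      rw [ih (d.insert uc (buf ++ [x])) (uc + 1) []
        (by
          intro k hkmem
          rw [PySem.Dict.keys_insert_of_not_contains _ _ hnc] at hkmem
          rcases List.mem_append.mp hkmem with h | h
          · have := hk k h; omega
          · simp at h; omega)]
      rw [PySem.Dict.items_insert_of_not_contains _ _ hnc]
      simp
    · rw [if_neg hc, if_neg hc]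
      exact ih d uc (buf ++ [x]) hk

theorem alt_map_eq (connections : List (String × String × String)) :
    group_connections_by_use_case_alt connections = pvGroupB connections 1 := by
  unfold group_connections_by_use_case_alt
  have hm : connections.map (fun p => (p.1, p.2.1, p.2.2)) = connections := by
    induction connections with
    | nil => rfl
    | cons y ys ih => simp [ih]
  simp only [hm]

-- ===== VERDICT (by name: the statement is the Claim_ definition above) =====
theorem group_connections_by_use_case_spec : Claim_equal_group_connections_by_use_case := by
  intro connections _
  unfold Spec_group_connections_by_use_case
  rw [alt_map_eq]
  unfold group_connections_by_use_case
  rw [pvFoldA_eq connections PySem.Dict.empty 1 [] (by simp [PySem.Dict.keys_empty])]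
  rw [pvGroupAux_nil_eq]
  simp [PySem.Dict.empty]
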